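-- pv_equiv track=rewrite | github.com/eronekogin/leetcode | Accepted/maximum_nesting_depth_of_two_valid_parentheses_strings.py | maxDepthAfterSplit
-- ===== SOURCE A (Python) =====
-- def maxDepthAfterSplit(seq: str) -> list[int]:
--     """
--     In order to make A and B sub sequences has the minimum
--     max(depth(A), depth(B)), the goal is to make A and B as even as
--     possible.
--     """
--     d1 = d2 = 0
--     rslt = [0] * len(seq)
--     for i, c in enumerate(seq):
--         if c == '(':
--             v = 1
--         else:
--             v = -1
--
--         if (v > 0) == (d1 < d2):
--             d1 += v
--         else:
--             d2 += v
--             rslt[i] = 1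
--
--     return rslt
-- ===== SOURCE B (Python) =====
-- def maxDepthAfterSplit(seq: str) -> list[int]:
--     depth = 0
--     rslt = []
--     for c in seq:
--         if c == '(':
--             depth += 1
--             rslt.append(depth % 2)
--         else:
--             rslt.append(depth % 2)
--             depth -= 1
--     return rslt
-- ===== Notes on version B (the rewrite author's own statement) =====
-- stated objective: simpler
-- what changed: Replaces the two balanced group counters d1/d2 and the branch on their comparison by a single nesting-depth counter whose parity directly gives each bracket's group, appending to the result instead of writing into a preallocated list.
import Mathlib
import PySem

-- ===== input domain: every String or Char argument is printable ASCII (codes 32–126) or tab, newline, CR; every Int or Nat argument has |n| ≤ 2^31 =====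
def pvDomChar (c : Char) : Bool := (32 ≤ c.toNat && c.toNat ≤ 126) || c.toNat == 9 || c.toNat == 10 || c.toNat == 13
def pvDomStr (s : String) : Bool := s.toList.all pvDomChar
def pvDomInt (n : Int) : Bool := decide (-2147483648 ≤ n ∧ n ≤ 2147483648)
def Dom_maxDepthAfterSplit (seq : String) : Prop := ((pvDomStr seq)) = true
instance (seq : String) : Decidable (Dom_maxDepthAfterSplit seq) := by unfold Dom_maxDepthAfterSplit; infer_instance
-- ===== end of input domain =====

-- B replaces A's two balanced counters d1/d2 by one nesting-depth counter whose parity is the group (simpler, same O(n) cost).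

-- ===== PORT A =====
-- loop over enumerate(seq) with state (i, d1, d2, rslt); rslt preallocated to zeros, rslt[i] = 1 via List.set
def maxDepthAfterSplitLoop : List Char → Nat → Int → Int → List Int → List Int
  | [], _, _, _, rslt => rslt
  | c :: cs, i, d1, d2, rslt =>
    let v : Int := if c = '(' then 1 else -1
    if (decide (v > 0)) = (decide (d1 < d2)) then
      maxDepthAfterSplitLoop cs (i + 1) (d1 + v) d2 rslt
    else
      maxDepthAfterSplitLoop cs (i + 1) d1 (d2 + v) (rslt.set i 1)

def maxDepthAfterSplit (seq : String) : List Int :=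
  maxDepthAfterSplitLoop seq.toList 0 0 0 (List.replicate seq.toList.length 0)

-- ===== PORT B =====
-- loop over seq with state (depth, rslt); appends depth % 2 (Python % = PySem.Int.mod)
def maxDepthAfterSplitAltLoop : List Char → Int → List Int → List Int
  | [], _, rslt => rslt
  | c :: cs, depth, rslt =>
    if c = '(' then
      maxDepthAfterSplitAltLoop cs (depth + 1) (rslt ++ [PySem.Int.mod (depth + 1) 2])
    else
      maxDepthAfterSplitAltLoop cs (depth - 1) (rslt ++ [PySem.Int.mod depth 2])

def maxDepthAfterSplit_alt (seq : String) : List Int :=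
  maxDepthAfterSplitAltLoop seq.toList 0 []

-- ===== PRECONDITION & SPEC =====
def Spec_maxDepthAfterSplit (seq : String) (out : List Int) : Prop := out = maxDepthAfterSplit_alt seq
instance (seq : String) (out : List Int) : Decidable (Spec_maxDepthAfterSplit seq out) := by unfold Spec_maxDepthAfterSplit; infer_instance

-- ===== CLAIM (what is proved, stated in full; the proofs are below) =====
def Claim_equal_maxDepthAfterSplit : Prop := ∀ (seq : String), Dom_maxDepthAfterSplit seq → Spec_maxDepthAfterSplit seq (maxDepthAfterSplit seq)

-- ===== LEMMAS AND PROOFS =====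

-- proof-only: B's output without the accumulator
def bSpec : List Char → Int → List Int
  | [], _ => []
  | c :: cs, depth =>
    if c = '(' then PySem.Int.mod (depth + 1) 2 :: bSpec cs (depth + 1)
    else PySem.Int.mod depth 2 :: bSpec cs (depth - 1)

lemma altLoop_eq (cs : List Char) (depth : Int) (r : List Int) :
    maxDepthAfterSplitAltLoop cs depth r = r ++ bSpec cs depth := by
  induction cs generalizing depth r with
  | nil => simp [maxDepthAfterSplitAltLoop, bSpec]
  | cons c cs ih =>
    by_cases hc : c = '('
    · simp [maxDepthAfterSplitAltLoop, bSpec, hc, ih]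
    · simp [maxDepthAfterSplitAltLoop, bSpec, hc, ih]

lemma mod2 (d : Int) : PySem.Int.mod d 2 = d % 2 :=
  PySem.Int.mod_eq_emod_of_pos (by omega)

lemma key (cs : List Char) (d1 d2 d : Int) (r0 : List Int)
    (h1 : d1 + d2 = d) (h2 : d2 - d1 = d % 2) :
    maxDepthAfterSplitLoop cs r0.length d1 d2 (r0 ++ List.replicate cs.length 0)
      = r0 ++ bSpec cs d := by
  induction cs generalizing d1 d2 d r0 with
  | nil => simp [maxDepthAfterSplitLoop, bSpec]
  | cons c cs ih =>
    have hm : d % 2 = 0 ∨ d % 2 = 1 := by omega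
    by_cases hc : c = '('
    · rcases hm with hm | hm
      · -- d even: d1 = d2, take else branch, rslt[i] = 1; new depth odd, bit 1
        have hlt : ¬ d1 < d2 := by omega
        have hm2 : (d + 1) % 2 = 1 := by omega
        have := ih d1 (d2 + 1) (d + 1) (r0 ++ [1]) (by omega) (by omega)
        simpa [maxDepthAfterSplitLoop, bSpec, hc, hlt, mod2, hm2,
               List.replicate_succ, List.append_assoc] using this
      · -- d odd: d1 < d2, take then branch; new depth even, bit 0
        have hlt : d1 < d2 := by omega
        have hm2 : (d + 1) % 2 = 0 := by omega
        have := ih (d1 + 1) d2 (d + 1) (r0 ++ [0]) (by omega) (by omega)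
        simpa [maxDepthAfterSplitLoop, bSpec, hc, hlt, mod2, hm2,
               List.replicate_succ, List.append_assoc] using this
    · rcases hm with hm | hm
      · -- d even: then branch (both sides false), bit 0
        have hle : d2 ≤ d1 := by omega
        have := ih (d1 + -1) d2 (d - 1) (r0 ++ [0]) (by omega) (by omega)
        simpa [maxDepthAfterSplitLoop, bSpec, hc, hle, hm, mod2,
               List.replicate_succ, List.append_assoc] using this
      · -- d odd: else branch, rslt[i] = 1
        have hle : ¬ d2 ≤ d1 := by omega
        have := ih d1 (d2 + -1) (d - 1) (r0 ++ [1]) (by omega) (by omega)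
        simpa [maxDepthAfterSplitLoop, bSpec, hc, hle, hm, mod2,
               List.replicate_succ, List.append_assoc] using this

-- ===== VERDICT (by name: the statement is the Claim_ definition above) =====
theorem maxDepthAfterSplit_spec : Claim_equal_maxDepthAfterSplit := by
  intro seq _
  unfold Spec_maxDepthAfterSplit maxDepthAfterSplit maxDepthAfterSplit_alt
  rw [altLoop_eq]
  simpa using key seq.toList 0 0 0 [] (by omega) (by omega)
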